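-- pv_equiv track=rewrite | github.com/NeoCortex97/EinfInf | Übung7/aufgabe_3.py | eintrag
-- ===== SOURCE A (Python) =====
-- def hat_schlaufe(buch, i):
--     if buch[i] == i:
--         return True
--     else:
--         return False
--
-- def laenge(buch, i):
--     if hat_schlaufe(buch, i):
--         return 1
--     else:
--         return laenge(buch, buch[i]) + 1
--
-- def eintrag(buch, i, j):
--     if j < laenge(buch, i):
--         result = buch[i]
--         for index in range(j - 1):
--             result = buch[result]
--         return result
--     else:
--         return -1
-- ===== SOURCE B (Python) =====
-- def eintrag(buch, i, j):
--     # Materialise the pointer chain once, then answer by direct indexing.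
--     chain = [i]
--     while buch[chain[-1]] != chain[-1]:
--         chain.append(buch[chain[-1]])
--     if 0 <= j < len(chain):
--         return chain[j]
--     return -1
-- ===== Notes on version B (the rewrite author's own statement) =====
-- stated objective: simpler
-- what changed: B replaces A's recursive length helper plus a separate pointer re-walk by one iterative loop that materialises the pointer chain and answers by direct indexing; Pre_ excludes negative j, outside the natural domain of a chain index, where A happens to return buch[i] while B returns -1.
-- intended difference: For j = 0 with buch[i] != i, A returns buch[i] (its empty range(j-1) walk collapses j=0 onto j=1, an off-by-one), while B returns i, the genuine 0th entry of the chain starting at i. — e.g. on eintrag([1, 1], 0, 0): A returns 1, B returns 0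
-- outside the precondition, e.g. on eintrag([1, 1], 0, -1): A returns 1, B returns -1
import Mathlib
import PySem

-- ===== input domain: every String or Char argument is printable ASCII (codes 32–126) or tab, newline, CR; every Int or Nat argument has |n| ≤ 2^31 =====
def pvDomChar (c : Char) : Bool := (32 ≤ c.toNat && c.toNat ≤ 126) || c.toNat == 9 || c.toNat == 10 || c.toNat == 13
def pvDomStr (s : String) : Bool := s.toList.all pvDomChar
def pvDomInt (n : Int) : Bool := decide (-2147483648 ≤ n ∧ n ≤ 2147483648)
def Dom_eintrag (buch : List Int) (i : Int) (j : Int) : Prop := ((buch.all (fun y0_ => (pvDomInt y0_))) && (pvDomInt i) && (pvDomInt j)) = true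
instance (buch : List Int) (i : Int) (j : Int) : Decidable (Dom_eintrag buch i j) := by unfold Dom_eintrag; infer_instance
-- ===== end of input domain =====

-- B materialises the pointer chain with one iterative loop and indexes into it,
-- instead of A's recursive length computation plus a second pointer walk;
-- objective: simpler (no speed claim). At j = 0 the values intentionally differ (see D_).

-- ===== PORT A =====
-- hat_schlaufe: buch[i] == i (none = IndexError)
def hatSchlaufe (buch : List Int) (i : Int) : Option Bool :=
  (PySem.List.pyGet? buch i).map (fun v => decide (v = i))

-- laenge: recursive; fuel makes it total, none = IndexError / non-termination
def laengeF (buch : List Int) (i : Int) : Nat → Option Int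
  | 0 => none
  | f + 1 =>
    match hatSchlaufe buch i with
    | none => none
    | some true => some 1
    | some false =>
      match PySem.List.pyGet? buch i with
      | none => none
      | some v => (laengeF buch v f).map (· + 1)

def eintrag (buch : List Int) (i : Int) (j : Int) : Int :=
  match laengeF buch i (2 * buch.length + 2) with
  | none => 0  -- unreachable under Pre_ (Python raises)
  | some L =>
    if j < L then
      match PySem.List.pyGet? buch i with
      | none => 0  -- unreachable under Pre_
      | some r0 =>
        match (PySem.List.pyRange 0 (j - 1) 1).foldl
            (fun acc _ => acc.bind (PySem.List.pyGet? buch)) (some r0) with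
        | none => 0  -- unreachable under Pre_
        | some r => r
    else -1

-- ===== PORT B =====
-- the while loop of Source B: grow `chain` until its last element is a fixpoint
def chainLoop (buch : List Int) (chain : List Int) (last : Int) : Nat → Option (List Int)
  | 0 => none
  | f + 1 =>
    match PySem.List.pyGet? buch last with
    | none => none
    | some v => if v = last then some chain else chainLoop buch (chain ++ [v]) v f

def eintrag_alt (buch : List Int) (i : Int) (j : Int) : Int :=
  match chainLoop buch [i] i (2 * buch.length + 2) with
  | none => 0  -- unreachable under Pre_
  | some c =>
    if 0 ≤ j ∧ j < (c.length : Int) then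
      match PySem.List.pyGet? c j with
      | none => 0  -- unreachable (index is in range)
      | some r => r
    else -1

-- ===== PRECONDITION & SPEC =====
-- Pre_: (a) the orbit of i under one pointer step o ↦ buch[o] stays index-valid and
-- stabilises within 2·len+1 steps, i.e. the chain reaches a self-loop (otherwise
-- Python A raises IndexError or RecursionError); (b) 0 ≤ j: a negative j is outside
-- the natural domain of a chain index — A happens to return buch[i] there (empty
-- range(j-1)), B returns -1.
def Pre_eintrag (buch : List Int) (i : Int) (j : Int) : Prop :=
  (∃ k : Nat, k < 2 * buch.length + 1 ∧
    ((fun o => o.bind (PySem.List.pyGet? buch))^[k] (some i)).isSome ∧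
    (fun o => o.bind (PySem.List.pyGet? buch))^[k + 1] (some i) =
      (fun o => o.bind (PySem.List.pyGet? buch))^[k] (some i)) ∧ 0 ≤ j

instance (buch : List Int) (i : Int) (j : Int) : Decidable (Pre_eintrag buch i j) := by
  unfold Pre_eintrag; infer_instance

def pvWitness_eintrag : List Int × Int × Int := ([1, 1], 0, 1)

-- For j = 0 with buch[i] ≠ i, A returns buch[i] (its empty range(j-1) walk collapses
-- j = 0 onto j = 1, an off-by-one), while B returns i, the genuine 0th chain entry.
def D_eintrag (buch : List Int) (i : Int) (j : Int) : Prop :=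
  j = 0 ∧ ¬ (PySem.List.pyGet? buch i = some i)
instance (buch : List Int) (i : Int) (j : Int) : Decidable (D_eintrag buch i j) := by
  unfold D_eintrag; infer_instance

def Spec_eintrag (buch : List Int) (i : Int) (j : Int) (out : Int) : Prop := ¬ D_eintrag buch i j → out = eintrag_alt buch i j
instance (buch : List Int) (i : Int) (j : Int) (out : Int) : Decidable (Spec_eintrag buch i j out) := by unfold Spec_eintrag; infer_instance

def pvDiffWitness_eintrag : List Int × Int × Int := ([1, 1], 0, 0)
def pvDiffWitnessOut_eintrag : Int × Int := (1, 0)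

-- ===== CLAIM (what is proved, stated in full; the proofs are below) =====
def Claim_unchanged_eintrag : Prop := ∀ (buch : List Int) (i : Int) (j : Int), Dom_eintrag buch i j → Pre_eintrag buch i j → Spec_eintrag buch i j (eintrag buch i j)
def Claim_changed_eintrag : Prop := Dom_eintrag (pvDiffWitness_eintrag.1) (pvDiffWitness_eintrag.2.1) (pvDiffWitness_eintrag.2.2) ∧ Pre_eintrag (pvDiffWitness_eintrag.1) (pvDiffWitness_eintrag.2.1) (pvDiffWitness_eintrag.2.2) ∧ D_eintrag (pvDiffWitness_eintrag.1) (pvDiffWitness_eintrag.2.1) (pvDiffWitness_eintrag.2.2) ∧ eintrag (pvDiffWitness_eintrag.1) (pvDiffWitness_eintrag.2.1) (pvDiffWitness_eintrag.2.2) = pvDiffWitnessOut_eintrag.1 ∧ eintrag_alt (pvDiffWitness_eintrag.1) (pvDiffWitness_eintrag.2.1) (pvDiffWitness_eintrag.2.2) = pvDiffWitnessOut_eintrag.2 ∧ pvDiffWitnessOut_eintrag.1 ≠ pvDiffWitnessOut_eintrag.2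
def Claim_exact_eintrag : Prop := ∀ (buch : List Int) (i : Int) (j : Int), Dom_eintrag buch i j → Pre_eintrag buch i j → D_eintrag buch i j → eintrag buch i j ≠ eintrag_alt buch i j

-- ===== LEMMAS AND PROOFS =====

-- proof-side view of the orbit in Pre_: the k-th chain element, if all lookups succeed
def chainIter (buch : List Int) (i : Int) : Nat → Option Int
  | 0 => some i
  | k + 1 =>
    match PySem.List.pyGet? buch i with
    | none => none
    | some v => chainIter buch v k

def pvFixAt (buch : List Int) (i : Int) (k : Nat) : Bool :=
  match chainIter buch i k with
  | some x => PySem.List.pyGet? buch x == some x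
  | none => false

theorem iterBind_none (g : Int → Option Int) : ∀ k, (fun o => o.bind g)^[k] none = none := by
  intro k
  induction k with
  | zero => rfl
  | succ k ih => rw [Function.iterate_succ_apply]; simpa using ih

theorem iterBind_eq_chainIter (buch : List Int) : ∀ (k : Nat) (i : Int),
    (fun o => o.bind (PySem.List.pyGet? buch))^[k] (some i) = chainIter buch i k := by
  intro k
  induction k with
  | zero => intro i; rfl
  | succ k ih =>
    intro i
    rw [Function.iterate_succ_apply]
    simp only [Option.bind_some, chainIter]
    cases hg : PySem.List.pyGet? buch i with
    | none => simpa using iterBind_none _ k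
    | some v => exact ih v

theorem chainIter_succ' (buch : List Int) : ∀ (k : Nat) (i : Int),
    chainIter buch i (k + 1) = (chainIter buch i k).bind (PySem.List.pyGet? buch) := by
  intro k
  induction k with
  | zero =>
    intro i
    simp only [chainIter]
    cases hg : PySem.List.pyGet? buch i <;> simp [hg]
  | succ k ih =>
    intro i
    show (match PySem.List.pyGet? buch i with
          | none => none
          | some v => chainIter buch v (k + 1)) =
        (match PySem.List.pyGet? buch i with
          | none => none
          | some v => chainIter buch v k).bind (PySem.List.pyGet? buch)
    cases hg : PySem.List.pyGet? buch i with
    | none => rfl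
    | some v => exact ih v

theorem pre_fixAt (buch : List Int) (i : Int) (k : Nat)
    (hs : ((fun o => o.bind (PySem.List.pyGet? buch))^[k] (some i)).isSome)
    (he : (fun o => o.bind (PySem.List.pyGet? buch))^[k + 1] (some i) =
      (fun o => o.bind (PySem.List.pyGet? buch))^[k] (some i)) :
    pvFixAt buch i k = true := by
  rw [iterBind_eq_chainIter] at hs
  rw [iterBind_eq_chainIter, iterBind_eq_chainIter] at he
  obtain ⟨x, hx⟩ := Option.isSome_iff_exists.mp hs
  rw [chainIter_succ', hx] at he
  simp only [pvFixAt, hx]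
  simpa using he

-- accumulator lemma for B's loop
theorem chainLoop_acc (buch : List Int) : ∀ (f : Nat) (last : Int) (pre : List Int),
    chainLoop buch (pre ++ [last]) last f = (chainLoop buch [last] last f).map (pre ++ ·) := by
  intro f
  induction f with
  | zero => intro last pre; simp [chainLoop]
  | succ f ih =>
    intro last pre
    simp only [chainLoop]
    cases hg : PySem.List.pyGet? buch last with
    | none => simp
    | some v =>
      by_cases hv : v = last
      · simp [hv]
      · simp only [hv, if_false]
        rw [ih v (pre ++ [last]), ih v [last], Option.map_map]
        congr 1
        funext x
        simp

-- structure of the chain B builds, and A's length on it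
theorem chainLoop_props (buch : List Int) : ∀ (f : Nat) (i : Int) (c : List Int),
    chainLoop buch [i] i f = some c →
    (∃ t, c = i :: t) ∧
    laengeF buch i f = some (c.length : Int) ∧
    (∀ m (h : m + 1 < c.length),
      PySem.List.pyGet? buch (GetElem.getElem c m (Nat.lt_of_succ_lt h)) =
        some (GetElem.getElem c (m + 1) h)) ∧
    (∀ (h : 0 < c.length),
      PySem.List.pyGet? buch (GetElem.getElem c (c.length - 1) (by omega)) =
        some (GetElem.getElem c (c.length - 1) (by omega))) ∧
    (PySem.List.pyGet? buch i).isSome := by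
  intro f
  induction f with
  | zero => intro i c h; simp [chainLoop] at h
  | succ f ih =>
    intro i c h
    simp only [chainLoop] at h
    cases hg : PySem.List.pyGet? buch i with
    | none => rw [hg] at h; simp at h
    | some v =>
      rw [hg] at h
      by_cases hv : v = i
      · simp only [hv, if_true] at h
        obtain rfl : c = [i] := by simpa using h.symm
        subst hv
        refine ⟨⟨[], rfl⟩, ?_, ?_, ?_, by simp⟩
        · simp [laengeF, hatSchlaufe, hg]
        · intro m hm; simp at hm
        · intro _; simpa using hg
      · simp only [hv, if_false] at h
        rw [chainLoop_acc] at h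
        cases hc' : chainLoop buch [v] v f with
        | none => rw [hc'] at h; simp at h
        | some c' =>
          rw [hc'] at h
          simp at h
          obtain ⟨⟨t, ht⟩, hlen, hstep, hlast, _⟩ := ih v c' hc'
          have hc : c = i :: c' := by simp [← h]
          subst hc
          refine ⟨⟨c', rfl⟩, ?_, ?_, ?_, by simp⟩
          · simp only [laengeF, hatSchlaufe, hg]
            simp [hv, hlen]
          · intro m hm
            match m with
            | 0 =>
              have hl0 : 0 < c'.length := by simp at hm; omega
              have : GetElem.getElem c' 0 hl0 = v := by simp [ht]
              simpa [this] using hg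
            | Nat.succ m =>
              have hm' : m + 1 < c'.length := by simpa using hm
              simpa using hstep m hm'
          · intro hpos
            have hne : c' ≠ [] := by simp [ht]
            have hl : 0 < c'.length := List.length_pos_of_ne_nil hne
            have hidx : (i :: c').length - 1 = (c'.length - 1) + 1 := by simp; omega
            have := hlast hl
            simp only [hidx, List.getElem_cons_succ]
            exact this

-- Pre_ guarantees B's loop (with the given fuel) returns
theorem chainLoop_total (buch : List Int) : ∀ (k : Nat) (i : Int) (f : Nat), k < f →
    pvFixAt buch i k = true → ∃ c, chainLoop buch [i] i f = some c := by
  intro k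
  induction k with
  | zero =>
    intro i f hf hfix
    obtain ⟨f', rfl⟩ : ∃ f', f = f' + 1 := ⟨f - 1, by omega⟩
    simp only [pvFixAt, chainIter, beq_iff_eq] at hfix
    exact ⟨[i], by simp [chainLoop, hfix]⟩
  | succ k ih =>
    intro i f hf hfix
    obtain ⟨f', rfl⟩ : ∃ f', f = f' + 1 := ⟨f - 1, by omega⟩
    simp only [pvFixAt, chainIter] at hfix
    cases hg : PySem.List.pyGet? buch i with
    | none => rw [hg] at hfix; simp at hfix
    | some v =>
      rw [hg] at hfix
      simp only [chainLoop, hg]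
      by_cases hv : v = i
      · exact ⟨[i], by simp [hv]⟩
      · simp only [hv, if_false]
        rw [chainLoop_acc]
        obtain ⟨c', hc'⟩ := ih v f' (by omega) (by simpa [pvFixAt] using hfix)
        exact ⟨[i] ++ c', by rw [hc']; rfl⟩

-- folding the walk over a range ignores the index: it is an iterate
theorem foldl_bind_const (g : Int → Option Int) : ∀ (l : List Int) (a : Option Int),
    l.foldl (fun acc _ => acc.bind g) a = (fun o => o.bind g)^[l.length] a := by
  intro l
  induction l with
  | nil => intro a; rfl
  | cons x xs ih => intro a; simp [List.foldl_cons, ih, Function.iterate_succ_apply]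

-- iterating the pointer step along the chain lands on chain entries
theorem iterate_chain (buch : List Int) (c : List Int)
    (hstep : ∀ m (h : m + 1 < c.length),
      PySem.List.pyGet? buch (GetElem.getElem c m (Nat.lt_of_succ_lt h)) =
        some (GetElem.getElem c (m + 1) h)) :
    ∀ (n m : Nat) (h : m + n < c.length),
      (fun o => o.bind (PySem.List.pyGet? buch))^[n] (some (GetElem.getElem c m (by omega))) =
        some (GetElem.getElem c (m + n) h) := by
  intro n
  induction n with
  | zero => intro m h; rfl
  | succ n ih =>
    intro m h
    rw [Function.iterate_succ_apply]
    have h1 : m + 1 < c.length := by omega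
    simp only [Option.bind_some]
    rw [hstep m h1]
    have := ih (m + 1) (by omega)
    rw [this]
    simp only [show m + 1 + n = m + (n + 1) from by omega]

-- ===== VERDICT (by name: the statement is the Claim_ definition above) =====
theorem eintrag_spec : Claim_unchanged_eintrag := by
  intro buch i j _ hpre hnD
  obtain ⟨⟨k, hk, hs, he⟩, hj0⟩ := hpre
  have hfix := pre_fixAt buch i k hs he
  obtain ⟨c, hc⟩ := chainLoop_total buch k i (2 * buch.length + 2) (by omega) hfix
  obtain ⟨⟨t, ht⟩, hlen, hstep, hlast, hsome⟩ := chainLoop_props buch _ i c hc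
  obtain ⟨r0, hg⟩ := Option.isSome_iff_exists.mp hsome
  have hcl : 0 < c.length := by simp [ht]
  unfold eintrag eintrag_alt
  simp only [hlen, hc]
  by_cases hj : j < (c.length : Int)
  · rw [if_pos hj, if_pos ⟨hj0, hj⟩]
    by_cases hj1 : j = 0
    · -- j = 0: ¬D_ forces buch[i] = i, so the chain is [i] and both sides give i
      subst hj1
      have hgi : PySem.List.pyGet? buch i = some i := by
        by_contra hne
        exact hnD ⟨rfl, hne⟩
      have hr0 : r0 = i := by rw [hgi] at hg; exact ((Option.some.injEq _ _).mp hg).symm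
      have hc0 : PySem.List.pyGet? c (0 : Int) = some i := by simp [ht]
      have hr : (PySem.List.pyRange 0 ((0 : Int) - 1) 1) = [] :=
        PySem.List.pyRange_one_eq_nil (by omega)
      simp only [hg, hr, List.foldl_nil, hc0, hr0]
    · -- j ≥ 1: A walks (j-1) steps from buch[i] = c[1], landing on c[j]; B reads c[j]
      have hj1' : 1 ≤ j := by omega
      set n : Nat := (j - 1).toNat with hn
      have hn1 : 1 + n < c.length := by omega
      have hstep0 : PySem.List.pyGet? buch (GetElem.getElem c 0 hcl) =
          some (GetElem.getElem c 1 (by omega)) := hstep 0 (by omega)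
      have hci : GetElem.getElem c 0 hcl = i := by simp [ht]
      rw [hci] at hstep0
      have hr0 : r0 = GetElem.getElem c 1 (by omega) := by
        rw [hstep0] at hg; exact ((Option.some.injEq _ _).mp hg).symm
      have hfold := foldl_bind_const (PySem.List.pyGet? buch)
        (PySem.List.pyRange 0 (j - 1) 1) (some (GetElem.getElem c 1 (by omega)))
      have hiter := iterate_chain buch c hstep n 1 hn1
      have hlen' : (j - 1 - 0).toNat = n := by omega
      have hjn : j = ((n + 1 : Nat) : Int) := by omega
      have hnlen : n + 1 < c.length := by omega
      have hA : (PySem.List.pyRange 0 (j - 1) 1).foldl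
          (fun acc _ => acc.bind (PySem.List.pyGet? buch)) (some r0)
          = some (GetElem.getElem c (1 + n) hn1) := by
        rw [hr0, hfold, PySem.List.length_pyRange_one, hlen', hiter]
      have hB : PySem.List.pyGet? c j = some (GetElem.getElem c (n + 1) hnlen) := by
        rw [hjn, PySem.List.pyGet?_natCast, List.getElem?_eq_getElem hnlen]
      simp only [hg, hA, hB]
      simp only [show 1 + n = n + 1 from by omega]
  · rw [if_neg hj, if_neg (by intro h; exact hj h.2)]

theorem eintrag_changed : Claim_changed_eintrag := by
  unfold Claim_changed_eintrag; decide

theorem eintrag_tight : Claim_exact_eintrag := by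
  intro buch i j _ hpre hD
  obtain ⟨⟨k, hk, hs, he⟩, _⟩ := hpre
  obtain ⟨hj0, hni⟩ := hD
  subst hj0
  have hfix := pre_fixAt buch i k hs he
  obtain ⟨c, hc⟩ := chainLoop_total buch k i (2 * buch.length + 2) (by omega) hfix
  obtain ⟨⟨t, ht⟩, hlen, hstep, hlast, hsome⟩ := chainLoop_props buch _ i c hc
  obtain ⟨r0, hg⟩ := Option.isSome_iff_exists.mp hsome
  have hcl : 0 < c.length := by simp [ht]
  have hr0i : r0 ≠ i := by
    intro h; exact hni (h ▸ hg)
  unfold eintrag eintrag_alt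
  simp only [hlen, hc]
  have hjc : (0 : Int) < (c.length : Int) := by exact_mod_cast hcl
  rw [if_pos hjc, if_pos ⟨le_refl 0, hjc⟩]
  have hc0 : PySem.List.pyGet? c (0 : Int) = some i := by simp [ht]
  have hr : (PySem.List.pyRange 0 ((0 : Int) - 1) 1) = [] :=
    PySem.List.pyRange_one_eq_nil (by omega)
  simp only [hg, hr, List.foldl_nil, hc0]
  exact hr0i
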